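-- pv_equiv track=rewrite | github.com/subinmun1997/my_python-for-coding-test | BAEKJOON/코테재활/프로그래머스 재활/Lv2/[3차] 방금그곡.py | solution
-- ===== SOURCE A (Python) =====
-- import math
--
-- def solution(m, musicinfos):
--     answer = []
--     m = m.replace("C#", "c").replace("D#", "d").replace("F#", "f").replace("G#", "g").replace("A#", "a")
--
--     for idx, musicinfo in enumerate(musicinfos):
--         start, end, title, code = musicinfo.split(",")
--
--         hour, minute = map(int, start.split(":"))
--         start = hour * 60 + minute
--
--         hour, minute = map(int, end.split(":"))
--         end = hour * 60 + minute
--         duration = end - start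
--
--         code = code.replace("C#", "c").replace("D#", "d").replace("F#", "f").replace("G#", "g").replace("A#", "a")
--         code *= math.ceil(duration / len(code))
--         code = code[:duration]
--
--         if m in code:
--             answer.append([duration, idx, title])
--
--     if not answer:
--         return "(None)"
--     elif len(answer) == 1:
--         return answer[0][2]
--     else:
--         answer = sorted(answer, key=lambda x : (-x[0], x[1]))
--         return answer[0][2]
-- ===== SOURCE B (Python) =====
-- def _minutes(t):
--     h, mm = t.split(":")
--     return int(h) * 60 + int(mm)
--
--
-- def solution(m, musicinfos):
--     key = m.replace("C#", "c").replace("D#", "d").replace("F#", "f").replace("G#", "g").replace("A#", "a")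
--     best = None  # (duration, title) of the best match so far
--     for musicinfo in musicinfos:
--         start, end, title, code = musicinfo.split(",")
--         duration = _minutes(end) - _minutes(start)
--         code = code.replace("C#", "c").replace("D#", "d").replace("F#", "f").replace("G#", "g").replace("A#", "a")
--         played = "".join(code[i % len(code)] for i in range(duration))
--         if key in played and (best is None or duration > best[0]):
--             best = (duration, title)
--     return "(None)" if best is None else best[1]
-- ===== Notes on version B (the rewrite author's own statement) =====
-- stated objective: simpler
-- what changed: B replaces A's collect-matches-into-a-list-then-sort-by-(-duration,idx) selection with a single online argmax (strict '>' keeps the earliest match) and builds each repeated melody by cyclic indexing code[i % len] over range(duration) instead of string-repeat-then-slice.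
-- outside the precondition, e.g. on solution('A', ['25:00,26:00,song,A']): A returns 'song', B returns 'song'; on solution('A', ['0:00,0:90,song,A']): A returns 'song', B returns 'song'
import Mathlib
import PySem

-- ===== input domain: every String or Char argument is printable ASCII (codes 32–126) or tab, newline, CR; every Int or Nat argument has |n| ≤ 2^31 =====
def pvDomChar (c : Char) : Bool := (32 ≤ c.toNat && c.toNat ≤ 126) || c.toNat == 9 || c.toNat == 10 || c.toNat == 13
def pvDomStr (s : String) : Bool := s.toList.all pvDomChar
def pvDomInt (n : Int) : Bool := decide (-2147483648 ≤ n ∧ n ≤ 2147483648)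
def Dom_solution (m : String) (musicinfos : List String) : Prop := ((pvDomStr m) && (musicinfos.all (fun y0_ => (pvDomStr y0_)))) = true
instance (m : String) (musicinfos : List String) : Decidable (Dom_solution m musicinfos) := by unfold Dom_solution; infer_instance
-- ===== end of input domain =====

-- B replaces A's collect-all-matches list + sort-by-(-duration,idx) selection with a single online
-- argmax and builds each repeated melody by cyclic indexing instead of string-repeat-then-slice
-- (objective: simpler; same asymptotic cost).

-- ===== PORT A =====
-- shared normalization: the identical chain of str.replace calls appears verbatim in both Pythons
def normSharp (s : List Char) : List Char :=
  PySem.Chars.replace (PySem.Chars.replace (PySem.Chars.replace (PySem.Chars.replace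
    (PySem.Chars.replace s ['C','#'] ['c']) ['D','#'] ['d']) ['F','#'] ['f']) ['G','#'] ['g']) ['A','#'] ['a']

-- one musicinfo, A's statements in order: none = the statement where Python A raises
def itemA? (m1 : List Char) (musicinfo : String) : Option (Int × String × Bool) :=
  match PySem.Chars.splitOn musicinfo.toList [','] with
  | [start, stop, title, code] =>
    match PySem.Chars.splitOn start [':'] with
    | [h1, mi1] =>
      match PySem.Int.ofChars? h1, PySem.Int.ofChars? mi1 with
      | some hour1, some min1 =>
        match PySem.Chars.splitOn stop [':'] with
        | [h2, mi2] =>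
          match PySem.Int.ofChars? h2, PySem.Int.ofChars? mi2 with
          | some hour2, some min2 =>
            let duration := (hour2 * 60 + min2) - (hour1 * 60 + min1)
            let code1 := normSharp code
            if code1.length = 0 then none  -- ZeroDivisionError in math.ceil(duration / len(code))
            else
              -- math.ceil(duration / len(code)) : exact integer ceiling -((-d)//len) on Pre_'s clock-time range
              let k := -(PySem.Int.floordiv (-duration) (code1.length : Int))
              let code2 := PySem.List.slice (PySem.List.pyRepeat code1 k) none (some duration)
              some (duration, String.ofList title, PySem.Chars.isIn m1 code2)
          | _, _ => none
        | _ => none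
      | _, _ => none
    | _ => none
  | _ => none

def solution (m : String) (musicinfos : List String) : String :=
  let m1 := normSharp m.toList
  let answer : List (Int × Int × String) :=
    (PySem.List.enumerate musicinfos).foldl (fun answer p =>
      match itemA? m1 p.2 with
      | some (duration, title, hit) => if hit then answer ++ [(duration, p.1, title)] else answer
      | none => answer) []
  if answer = [] then "(None)"
  else if answer.length = 1 then
    match answer with
    | x :: _ => x.2.2
    | [] => "(None)"
  else
    match PySem.List.sorted2 answer (fun x => -x.1) (fun x => x.2.1) with
    | x :: _ => x.2.2
    | [] => "(None)"

-- ===== PORT B =====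
def minutesB? (t : List Char) : Option Int :=
  match PySem.Chars.splitOn t [':'] with
  | [h, mm] =>
    match PySem.Int.ofChars? h, PySem.Int.ofChars? mm with
    | some hv, some mv => some (hv * 60 + mv)
    | _, _ => none
  | _ => none

-- "".join(code[i % len(code)] for i in range(duration)); none = ZeroDivisionError (i % 0)
def playedB? (code : List Char) (duration : Int) : Option (List Char) :=
  if duration ≤ 0 then some []
  else if code.length = 0 then none
  else some ((PySem.List.pyRange 0 duration 1).map
    (fun i => code.getD (PySem.Int.mod i (code.length : Int)).toNat ' '))  -- index provably in range

def itemB? (key : List Char) (musicinfo : String) : Option (Int × String × Bool) :=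
  match PySem.Chars.splitOn musicinfo.toList [','] with
  | [start, stop, title, code] =>
    match minutesB? stop, minutesB? start with
    | some e, some s =>
      let duration := e - s
      match playedB? (normSharp code) duration with
      | some played => some (duration, String.ofList title, PySem.Chars.isIn key played)
      | none => none
    | _, _ => none
  | _ => none

def solution_alt (m : String) (musicinfos : List String) : String :=
  let key := normSharp m.toList
  let best := musicinfos.foldl (fun best musicinfo =>
    match itemB? key musicinfo with
    | some (duration, title, hit) =>
      if hit && (match best with | none => true | some bd => decide (bd.1 < duration)) then
        some (duration, title)
      else best
    | none => best) (none : Option (Int × String))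
  match best with
  | none => "(None)"
  | some b => b.2

-- ===== PRECONDITION & SPEC =====
-- Pre_ excludes inputs where Python A raises (a musicinfo without exactly 4 comma fields, a time
-- without exactly 2 int-parsable colon fields, a code that normalizes to the empty string:
-- ZeroDivisionError) and, beyond that, restricts the parsed times to clock values (hour 0..23,
-- minute 0..59) as the original problem guarantees: outside that range A still returns but
-- materializes an astronomically long repeated string (and its float ceil can lose exactness).
def timeOK (x : List Char) : Bool :=
  match PySem.Chars.splitOn x [':'] with
  | [h, mi] =>
    match PySem.Int.ofChars? h, PySem.Int.ofChars? mi with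
    | some hv, some mv => decide (0 ≤ hv ∧ hv ≤ 23 ∧ 0 ≤ mv ∧ mv ≤ 59)
    | _, _ => false
  | _ => false

def infoOK (info : String) : Bool :=
  match PySem.Chars.splitOn info.toList [','] with
  | [start, stop, _title, code] =>
    timeOK start && timeOK stop &&
      !(PySem.Chars.replace (PySem.Chars.replace (PySem.Chars.replace (PySem.Chars.replace
        (PySem.Chars.replace code ['C','#'] ['c']) ['D','#'] ['d']) ['F','#'] ['f']) ['G','#'] ['g']) ['A','#'] ['a']).isEmpty
  | _ => false

def Pre_solution (m : String) (musicinfos : List String) : Prop :=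
  musicinfos.all infoOK = true

instance (m : String) (musicinfos : List String) : Decidable (Pre_solution m musicinfos) := by
  unfold Pre_solution; infer_instance

def pvWitness_solution : String × List String := ("ABC", ["12:00,12:14,WORLD,ABCDEF", "12:00,12:04,HELLO,C#ABC"])

def Spec_solution (m : String) (musicinfos : List String) (out : String) : Prop := out = solution_alt m musicinfos
instance (m : String) (musicinfos : List String) (out : String) : Decidable (Spec_solution m musicinfos out) := by unfold Spec_solution; infer_instance

-- ===== CLAIM (what is proved, stated in full; the proofs are below) =====
def Claim_equal_solution : Prop := ∀ (m : String) (musicinfos : List String), Dom_solution m musicinfos → Pre_solution m musicinfos → Spec_solution m musicinfos (solution m musicinfos)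

-- ===== LEMMAS AND PROOFS =====

theorem takeSmall (n : Nat) (code : List Char) (hn : n ≤ code.length) :
    code.take n = (List.range n).map (fun i => code.getD (i % code.length) ' ') := by
  apply List.ext_getElem
  · simp [Nat.min_eq_left hn]
  · intro i h1 h2
    have hi : i < n := by simpa using h2
    have hilen : i < code.length := lt_of_lt_of_le hi hn
    simp [List.getElem_take, List.getD_eq_getElem, Nat.mod_eq_of_lt hilen, hilen]

theorem takeRep (K n : Nat) (code : List Char) (hc : 0 < code.length) (hn : n ≤ K * code.length) :
    ((List.replicate K code).flatten).take n
      = (List.range n).map (fun i => code.getD (i % code.length) ' ') := by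
  induction K generalizing n with
  | zero =>
    simp at hn; subst hn; simp
  | succ K ih =>
    rw [List.replicate_succ, List.flatten_cons]
    by_cases h : n ≤ code.length
    · rw [List.take_append_of_le_length h, takeSmall n code h]
    · push_neg at h
      have hr : n = code.length + (n - code.length) := by omega
      rw [List.take_append, List.take_of_length_le (le_of_lt h), hr, List.range_add,
        List.map_append, List.map_map]
      rw [show code.length + (n - code.length) - code.length = n - code.length by omega]
      have h1 : (List.range code.length).map (fun i => code.getD (i % code.length) ' ') = code := by
        rw [← takeSmall code.length code le_rfl, List.take_length]
      have h2 : ((fun i => code.getD (i % code.length) ' ') ∘ (fun j => code.length + j))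
          = fun j => code.getD (j % code.length) ' ' := by
        funext j; simp [Nat.add_mod_left]
      rw [h1, h2, ih (n - code.length) (by
        have := hn; rw [Nat.succ_mul] at this; omega)]

theorem played_eq (code1 : List Char) (d : Int) (hne : code1 ≠ []) :
    PySem.List.slice (PySem.List.pyRepeat code1 (-(PySem.Int.floordiv (-d) (code1.length : Int)))) none (some d)
      = if d ≤ 0 then ([] : List Char)
        else (PySem.List.pyRange 0 d 1).map (fun i => code1.getD (PySem.Int.mod i (code1.length : Int)).toNat ' ') := by
  have hlen : 0 < code1.length := List.length_pos_iff.mpr hne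
  have hL : (0 : Int) < (code1.length : Int) := by exact_mod_cast hlen
  set k : Int := -(PySem.Int.floordiv (-d) (code1.length : Int)) with hk
  have hbounds : (k - 1) * (code1.length : Int) < d ∧ d ≤ k * (code1.length : Int) :=
    (PySem.Int.neg_floordiv_neg_eq_iff_of_pos hL).mp hk.symm
  by_cases hd : d ≤ 0
  · -- k ≤ 0, repetition empty, slice of [] is []
    have hk0 : k ≤ 0 := by
      have h1 : 0 ≤ PySem.Int.floordiv (-d) (code1.length : Int) := by
        rw [PySem.Int.floordiv_eq_ediv_of_pos hL]
        exact Int.ediv_nonneg (by omega) (by omega)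
      omega
    have hrep : PySem.List.pyRepeat code1 k = [] := by
      unfold PySem.List.pyRepeat
      rw [Int.toNat_of_nonpos hk0]
      simp
    rw [hrep, if_pos hd]
    have := PySem.List.length_slice_le ([] : List Char) none (some d)
    simpa using List.eq_nil_of_length_eq_zero (by simpa using this)
  · push_neg at hd
    rw [if_neg (by omega)]
    have hd0 : (0:Int) ≤ d := le_of_lt hd
    rw [PySem.List.slice_to _ hd0]
    unfold PySem.List.pyRepeat
    have hdk : (d.toNat : Nat) ≤ k.toNat * code1.length := by
      have hk1 : 0 < k := by
        by_contra hcon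
        push_neg at hcon
        have : k * (code1.length : Int) ≤ 0 := mul_nonpos_of_nonpos_of_nonneg hcon (by omega)
        omega
      have : (d.toNat : Int) ≤ (k.toNat : Int) * (code1.length : Int) := by
        rw [Int.toNat_of_nonneg hd0, Int.toNat_of_nonneg (le_of_lt hk1)]
        exact hbounds.2
      exact_mod_cast this
    rw [takeRep k.toNat d.toNat code1 hlen hdk]
    -- B side: pyRange 0 d = map cast (range d.toNat)
    have hdcast : d = ((d.toNat : Nat) : Int) := (Int.toNat_of_nonneg hd0).symm
    rw [hdcast, PySem.List.pyRange_zero_natCast, List.map_map]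
    apply List.map_congr_left
    intro i _
    simp only [Function.comp_apply, PySem.Int.mod_natCast, Int.toNat_natCast]

theorem item_eq (m1 : List Char) (info : String) (hok : infoOK info = true) :
    itemB? m1 info = itemA? m1 info ∧ (itemA? m1 info).isSome := by
  unfold infoOK at hok
  unfold itemA? itemB? minutesB? timeOK at *
  split at hok
  case _ start stop _title code heq =>
    try simp only [heq]
    simp only [Bool.and_eq_true] at hok
    obtain ⟨⟨hts, hte⟩, hcode⟩ := hok
    split at hts
    case _ h1 mi1 heq1 =>
      try simp only [heq1]
      split at hts
      case _ hv1 mv1 heqa heqb =>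
        try simp only [heqa, heqb]
        split at hte
        case _ h2 mi2 heq2 =>
          try simp only [heq2]
          split at hte
          case _ hv2 mv2 heqc heqd =>
            try simp only [heqc, heqd]
            have hne : normSharp code ≠ [] := by
              simp only [Bool.not_eq_true', List.isEmpty_eq_false_iff] at hcode
              simpa [normSharp] using hcode
            have hlen0 : ¬ (normSharp code).length = 0 := by
              simpa [List.length_eq_zero_iff] using hne
            simp only [if_neg hlen0, playedB?]
            rw [played_eq (normSharp code) ((hv2 * 60 + mv2) - (hv1 * 60 + mv1)) hne]
            by_cases hd : (hv2 * 60 + mv2) - (hv1 * 60 + mv1) ≤ 0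
            · simp [hd, hlen0]
            · simp [hd, hlen0]
          all_goals simp at hte
        all_goals simp at hte
      all_goals simp at hts
    all_goals simp at hts
  all_goals simp at hok

def bfr (a b : Int × Int × String) : Bool :=
  decide (-a.1 < -b.1) || (!decide (-b.1 < -a.1) && decide (a.2.1 < b.2.1))

theorem bfr_iff (a b : Int × Int × String) :
    bfr a b = true ↔ (b.1 < a.1 ∨ (a.1 = b.1 ∧ a.2.1 < b.2.1)) := by
  simp only [bfr, Bool.or_eq_true, Bool.and_eq_true, Bool.not_eq_true', decide_eq_true_eq,
    decide_eq_false_iff_not]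
  omega

theorem pw_insert (x : Int × Int × String) (ys : List (Int × Int × String))
    (hp : ys.Pairwise (fun a b => bfr a b = true))
    (htot : ∀ y ∈ ys, bfr x y = true ∨ bfr y x = true) :
    (PySem.List.insertBy bfr x ys).Pairwise (fun a b => bfr a b = true) := by
  induction ys with
  | nil => simp [PySem.List.insertBy]
  | cons y t ih =>
    rw [List.pairwise_cons] at hp
    obtain ⟨hyt, hpt⟩ := hp
    by_cases hxy : bfr x y = true
    · simp only [PySem.List.insertBy, hxy, if_true]
      refine List.Pairwise.cons ?_ (List.Pairwise.cons hyt hpt)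
      intro z hz
      rcases List.mem_cons.mp hz with rfl | hz
      · exact hxy
      · -- transitivity bfr x y, bfr y z
        have := hyt z hz
        rw [bfr_iff] at *
        omega
    · simp only [PySem.List.insertBy, hxy]
      refine List.Pairwise.cons ?_ (ih hpt (fun z hz => htot z (List.mem_cons_of_mem _ hz)))
      intro z hz
      rw [PySem.List.mem_insertBy] at hz
      rcases hz with rfl | hz
      · rcases htot y List.mem_cons_self with h | h
        · exact absurd h hxy
        · exact h
      · exact hyt z hz

theorem pw_fold (L : List (Int × Int × String)) : ∀ (acc : List (Int × Int × String)),
    acc.Pairwise (fun a b => bfr a b = true) →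
    (∀ a ∈ acc, ∀ b ∈ L, bfr a b = true ∨ bfr b a = true) →
    L.Pairwise (fun a b => bfr a b = true ∨ bfr b a = true) →
    (L.foldl (fun acc x => PySem.List.insertBy bfr x acc) acc).Pairwise (fun a b => bfr a b = true) := by
  induction L with
  | nil => intro acc hp _ _; simpa using hp
  | cons x t ih =>
    intro acc hp hLa hL
    rw [List.pairwise_cons] at hL
    obtain ⟨hxt, hLt⟩ := hL
    simp only [List.foldl_cons]
    apply ih
    · exact pw_insert x acc hp (fun y hy => (hLa y hy x List.mem_cons_self).symm)
    · intro a ha b hb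
      rw [PySem.List.mem_insertBy] at ha
      rcases ha with rfl | ha
      · exact hxt b hb
      · exact hLa a ha b (List.mem_cons_of_mem _ hb)
    · exact hLt

def stepZ (o : Option (Int × Int × String)) (y : Int × Int × String) : Option (Int × Int × String) :=
  match o with
  | none => some y
  | some z => if z.1 < y.1 then some y else o

def selZ (L : List (Int × Int × String)) : Option (Int × Int × String) := L.foldl stepZ none

theorem selZ_spec (L : List (Int × Int × String))
    (hp : L.Pairwise (fun a b => a.2.1 < b.2.1)) :
    (L = [] ∧ selZ L = none) ∨
      ∃ z, selZ L = some z ∧ z ∈ L ∧ ∀ y ∈ L, y.1 < z.1 ∨ (y.1 = z.1 ∧ z.2.1 ≤ y.2.1) := by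
  induction L using List.reverseRecOn with
  | nil => exact Or.inl ⟨rfl, rfl⟩
  | append_singleton L y ih =>
    rw [List.pairwise_append] at hp
    obtain ⟨hpL, _, hcross⟩ := hp
    have hstep : selZ (L ++ [y]) = stepZ (selZ L) y := by
      simp [selZ, List.foldl_append]
    rcases ih hpL with ⟨rfl, hnone⟩ | ⟨z, hz, hzmem, hzmax⟩
    · refine Or.inr ⟨y, ?_, by simp, ?_⟩
      · rfl
      · intro w hw
        simp at hw
        subst hw
        omega
    · by_cases hlt : z.1 < y.1
      · refine Or.inr ⟨y, ?_, by simp, ?_⟩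
        · simp [hstep, hz, stepZ, hlt]
        · intro w hw
          rcases List.mem_append.mp hw with hw | hw
          · rcases hzmax w hw with h | h
            · exact Or.inl (by omega)
            · exact Or.inl (by omega)
          · simp at hw; subst hw; omega
      · refine Or.inr ⟨z, ?_, List.mem_append_left _ hzmem, ?_⟩
        · simp [hstep, hz, stepZ, hlt]
        · intro w hw
          rcases List.mem_append.mp hw with hw | hw
          · exact hzmax w hw
          · simp at hw
            subst hw
            have : z.2.1 < w.2.1 := hcross z hzmem w (by simp)
            omega


-- enumerate / filter bridge: filtering then dropping indices = filtering the bare list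
theorem enum_filter_map {α : Type} (q : α → Bool) (xs : List α) (s : Int) :
    ((PySem.List.enumerate xs s).filter (fun p => q p.2)).map Prod.snd = xs.filter q := by
  induction xs generalizing s with
  | nil => simp [PySem.List.enumerate_nil]
  | cons x t ih =>
    rw [PySem.List.enumerate_cons]
    by_cases hx : q x <;> simp [hx, ih]

-- B's selection step, on (duration, title) pairs
def stepP (o : Option (Int × String)) (z : Int × Int × String) : Option (Int × String) :=
  if (match o with | none => true | some bd => decide (bd.1 < z.1)) then some (z.1, z.2.2) else o

theorem stepP_proj (o : Option (Int × Int × String)) (z : Int × Int × String) :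
    stepP (o.map (fun w => (w.1, w.2.2))) z = (stepZ o z).map (fun w => (w.1, w.2.2)) := by
  cases o with
  | none => simp [stepP, stepZ]
  | some w =>
    by_cases h : w.1 < z.1 <;> simp [stepP, stepZ, h]

theorem foldl_stepP (L : List (Int × Int × String)) (o : Option (Int × Int × String)) :
    L.foldl stepP (o.map (fun w => (w.1, w.2.2)))
      = (L.foldl stepZ o).map (fun w => (w.1, w.2.2)) := by
  induction L generalizing o with
  | nil => rfl
  | cons z t ih => rw [List.foldl_cons, List.foldl_cons, stepP_proj, ih]

theorem main_eq (m : String) (musicinfos : List String)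
    (hpre : ∀ info ∈ musicinfos, infoOK info = true) :
    solution m musicinfos = solution_alt m musicinfos := by
  simp only [solution, solution_alt]
  set m1 := normSharp m.toList with hm1
  set g : String → Int × String × Bool := fun info => (itemA? m1 info).getD (0, "", false) with hg
  have hgA : ∀ info ∈ musicinfos, itemA? m1 info = some (g info) := by
    intro info hmem
    obtain ⟨_, hs⟩ := item_eq m1 info (hpre info hmem)
    cases hA : itemA? m1 info with
    | none => rw [hA] at hs; simp at hs
    | some v => simp [hg, hA]
  have hgB : ∀ info ∈ musicinfos, itemB? m1 info = some (g info) := by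
    intro info hmem
    obtain ⟨he, _⟩ := item_eq m1 info (hpre info hmem)
    rw [he]; exact hgA info hmem
  have hmemE : ∀ p ∈ PySem.List.enumerate musicinfos, p.2 ∈ musicinfos := by
    intro p hp
    rw [PySem.List.mem_enumerate_iff] at hp
    obtain ⟨k, hk, rfl⟩ := hp
    simp
  -- A's loop is a filter-map over the enumerated list
  set qE : Int × String → Bool := fun p => (g p.2).2.2 with hqE
  set fmap : Int × String → Int × Int × String := fun p => ((g p.2).1, p.1, (g p.2).2.1) with hfmap
  have hAfold :
      (PySem.List.enumerate musicinfos).foldl (fun answer p =>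
          match itemA? m1 p.2 with
          | some (duration, title, hit) => if hit then answer ++ [(duration, p.1, title)] else answer
          | none => answer) []
        = ((PySem.List.enumerate musicinfos).filter qE).map fmap := by
    rw [PySem.List.foldl_congr_mem _ _
      (fun answer p => if qE p then answer ++ [fmap p] else answer) _ ?_]
    · simpa using PySem.List.foldl_append_if qE fmap (PySem.List.enumerate musicinfos) []
    · intro acc p hp
      rw [hgA p.2 (hmemE p hp)]
  -- B's loop is the argmax fold over the same triples
  have hBfold :
      musicinfos.foldl (fun best musicinfo =>
          match itemB? m1 musicinfo with
          | some (duration, title, hit) =>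
            if hit && (match best with | none => true | some bd => decide (bd.1 < duration)) then
              some (duration, title)
            else best
          | none => best) (none : Option (Int × String))
        = ((((PySem.List.enumerate musicinfos).filter qE).map fmap).foldl stepZ none).map
            (fun w => (w.1, w.2.2)) := by
    rw [PySem.List.foldl_congr_mem _ _
      (fun best info => if (fun info => (g info).2.2) info then stepP best (fmap ((0 : Int), info)) else best) _ ?_]
    · rw [PySem.List.foldl_if_eq_foldl_filter]
      rw [← enum_filter_map (fun info => (g info).2.2) musicinfos 0, List.foldl_map]
      have hfun : (fun (b : Option (Int × String)) (p : Int × String) => stepP b (fmap ((0 : Int), p.2)))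
          = fun b p => stepP b (fmap p) := by
        funext b p
        simp [stepP, hfmap]
      have hqeq : (fun (p : Int × String) => (fun info => (g info).2.2) p.2) = qE := by
        funext p; rfl
      rw [hfun, hqeq, ← List.foldl_map (f := fmap) (g := stepP)]
      rw [show (none : Option (Int × String)) = (Option.map (fun w : Int × Int × String => (w.1, w.2.2)) none) from rfl,
        foldl_stepP]
    · intro acc info hmem
      rw [hgB info hmem]
      rcases hgi : g info with ⟨d, t, hit⟩
      cases hit with
      | false => simp [hgi]
      | true =>
        cases acc with
        | none => simp [stepP, hfmap, hgi]
        | some bd => by_cases hlt : bd.1 < d <;> simp [stepP, hfmap, hgi, hlt]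
  rw [hAfold, hBfold]
  set answer : List (Int × Int × String) := ((PySem.List.enumerate musicinfos).filter qE).map fmap with hans
  -- the collected answer list has strictly increasing indices
  have hpw_idx : answer.Pairwise (fun a b => a.2.1 < b.2.1) := by
    rw [hans, List.pairwise_map]
    exact ((PySem.List.pairwise_lt_enumerate musicinfos 0).filter _).imp (fun h => h)
  clear_value answer
  rcases selZ_spec answer hpw_idx with ⟨rfl, hsel⟩ | ⟨z, hsel, hzmem, hzmax⟩
  · simp only [selZ] at hsel
    rw [hsel]
    simp
  · have hne : answer ≠ [] := by rintro rfl; simp at hzmem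
    rw [show answer.foldl stepZ none = selZ answer from rfl, hsel]
    rw [if_neg hne]
    by_cases hlen : answer.length = 1
    · rw [if_pos hlen]
      rw [List.length_eq_one_iff] at hlen
      obtain ⟨x, rfl⟩ := hlen
      obtain rfl : x = z := by simpa [selZ, stepZ] using hsel
      simp
    · rw [if_neg hlen]
      -- sorted2 = insertion fold with the lexicographic before-relation bfr
      have hS : PySem.List.sorted2 answer (fun x => -x.1) (fun x => x.2.1)
          = answer.foldl (fun acc x => PySem.List.insertBy bfr x acc) [] := rfl
      have hpwS : (PySem.List.sorted2 answer (fun x => -x.1) (fun x => x.2.1)).Pairwise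
          (fun a b => bfr a b = true) := by
        rw [hS]
        refine pw_fold answer [] (by simp) (by simp) ?_
        refine hpw_idx.imp ?_
        intro a b hab
        rw [bfr_iff, bfr_iff]
        omega
      have hperm : (PySem.List.sorted2 answer (fun x => -x.1) (fun x => x.2.1)).Perm answer :=
        PySem.List.sorted2_perm answer _ _ false
      rcases hSc : PySem.List.sorted2 answer (fun x => -x.1) (fun x => x.2.1) with _ | ⟨h, tl⟩
      · rw [hSc] at hperm
        exact absurd hperm.symm.eq_nil hne
      · rw [hSc] at hpwS hperm
        have hhmem : h ∈ answer := hperm.subset List.mem_cons_self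
        have hmin : ∀ w ∈ answer, w = h ∨ bfr h w = true := by
          intro w hw
          rcases List.mem_cons.mp (hperm.mem_iff.mpr hw) with rfl | hw'
          · exact Or.inl rfl
          · exact Or.inr ((List.pairwise_cons.mp hpwS).1 w hw')
        have hzh : z = h := by
          rcases hmin z hzmem with rfl | hb
          · rfl
          · exfalso
            rcases hzmax h hhmem with hc | hc
            · rw [bfr_iff] at hb; omega
            · rw [bfr_iff] at hb; omega
        simp [hzh]

-- ===== VERDICT (by name: the statement is the Claim_ definition above) =====
theorem solution_spec : Claim_equal_solution := by
  intro m musicinfos _ hpre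
  unfold Spec_solution
  unfold Pre_solution at hpre
  rw [List.all_eq_true] at hpre
  exact main_eq m musicinfos hpre
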